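-- pv_equiv track=rewrite | github.com/minhnguyen10/CSCI-5541-Natural-Language-Processing | HW4/classifier_copyV6.py | getfreferunigram
-- ===== SOURCE A (Python) =====
-- def getfreferunigram(unigram_model):
--     frequencies = {}
--     for w1 in unigram_model:
--         ngram_count = unigram_model[w1]
--         if ngram_count in frequencies:
--             frequencies[ngram_count] += 1
--         else:
--             frequencies[ngram_count] = 1
--     return frequencies
-- ===== SOURCE B (Python) =====
-- def getfreferunigram(unigram_model):
--     # Recursive run-extraction over distinct values: take the first remaining
--     # count, record how often it occurs, drop all its occurrences, recurse.
--     def runs(vals):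
--         if not vals:
--             return []
--         c = vals[0]
--         return [(c, vals.count(c))] + runs([v for v in vals if v != c])
--     return dict(runs(list(unigram_model.values())))
-- ===== Notes on version B (the rewrite author's own statement) =====
-- stated objective: alternative
-- what changed: Replaces the hash-table single scan with increments by a recursion over distinct values that records each value's total count via list.count and filters its occurrences away, then builds the dict from the pair list once.
import Mathlib
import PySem

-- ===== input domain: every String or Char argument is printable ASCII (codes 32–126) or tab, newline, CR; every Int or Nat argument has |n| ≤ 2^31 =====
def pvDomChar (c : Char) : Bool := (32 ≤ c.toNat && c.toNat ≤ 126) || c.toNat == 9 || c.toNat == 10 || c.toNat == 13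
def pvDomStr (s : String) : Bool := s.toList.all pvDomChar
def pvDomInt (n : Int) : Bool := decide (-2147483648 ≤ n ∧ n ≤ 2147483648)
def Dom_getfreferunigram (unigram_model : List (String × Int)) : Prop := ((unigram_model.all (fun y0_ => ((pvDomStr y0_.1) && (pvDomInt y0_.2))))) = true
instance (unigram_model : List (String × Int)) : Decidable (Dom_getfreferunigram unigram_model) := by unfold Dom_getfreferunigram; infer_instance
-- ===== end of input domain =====

-- B replaces A's hash-table scan with increments by a recursion over the distinct
-- values (count once, filter away, recurse); alternative decomposition, not faster.

-- ===== PORT A =====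
-- A receives a Python dict; the association-list argument is read through
-- PySem.Dict.ofList (exactly dict(pairs): later value wins, first position kept).
def getfreferunigram (unigram_model : List (String × Int)) : List (Int × Int) :=
  let d := PySem.Dict.ofList unigram_model
  -- for w1 in unigram_model: ngram_count = unigram_model[w1] — w1 ∈ d.keys, so the
  -- lookup always succeeds; d.getD w1 0 is exact here.
  (d.keys.foldl (fun frequencies w1 =>
      let ngram_count := d.getD w1 0
      if frequencies.contains ngram_count then
        frequencies.modify ngram_count 0 (· + 1)
      else
        frequencies.insert ngram_count 1)
    (PySem.Dict.empty : PySem.Dict Int Int)).items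

-- ===== PORT B =====
-- runs(vals): first remaining value with its total count, then recurse on the rest
def pvRuns : List Int → List (Int × Int)
  | [] => []
  | c :: rest =>
      (c, ((c :: rest).count c : Int)) :: pvRuns (rest.filter (fun v => !(v == c)))
termination_by vs => vs.length
decreasing_by
  have h := List.length_filter_le (fun x => !(x.1 == c)) rest.attach
  simp only [List.length_attach] at h
  simpa using Nat.lt_succ_of_le h

def getfreferunigram_alt (unigram_model : List (String × Int)) : List (Int × Int) :=
  (PySem.Dict.ofList (pvRuns (PySem.Dict.ofList unigram_model).values)).items

-- ===== PRECONDITION & SPEC =====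
def Spec_getfreferunigram (unigram_model : List (String × Int)) (out : List (Int × Int)) : Prop := out = getfreferunigram_alt unigram_model
instance (unigram_model : List (String × Int)) (out : List (Int × Int)) : Decidable (Spec_getfreferunigram unigram_model out) := by unfold Spec_getfreferunigram; infer_instance

-- ===== CLAIM (what is proved, stated in full; the proofs are below) =====
def Claim_equal_getfreferunigram : Prop := ∀ (unigram_model : List (String × Int)), Dom_getfreferunigram unigram_model → Spec_getfreferunigram unigram_model (getfreferunigram unigram_model)

-- ===== LEMMAS AND PROOFS =====

-- A's branch is exactly Counter's modify step
lemma pvStep_eq (frequencies : PySem.Dict Int Int) (c : Int) :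
    (if frequencies.contains c then frequencies.modify c 0 (· + 1)
     else frequencies.insert c 1) = frequencies.modify c 0 (· + 1) := by
  by_cases h : frequencies.contains c = true
  · simp [h]
  · simp only [Bool.not_eq_true] at h
    simp [h, PySem.Dict.modify, PySem.Dict.getD_of_not_contains _ _ h]

-- set(...) commutes with filter (first occurrences are preserved by filtering)
lemma pvOfList_filter (p : Int → Bool) (vs : List Int) :
    PySem.Set.ofList (vs.filter p) = (PySem.Set.ofList vs).filter p := by
  induction vs with
  | nil => rfl
  | cons v vs ih =>
      rw [List.filter_cons, PySem.Set.ofList_cons]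
      by_cases hv : p v = true
      · rw [if_pos hv, PySem.Set.ofList_cons, ih, List.filter_cons_of_pos hv]
        simp only [PySem.Set.discard, List.filter_filter]
        congr 1
        exact List.filter_congr fun x _ => Bool.and_comm _ _
      · have hv' : p v = false := by simpa using hv
        rw [if_neg hv, ih]
        simp only [PySem.Set.discard]
        rw [List.filter_cons_of_neg (by simp [hv']), List.filter_filter]
        apply List.filter_congr
        intro x hx
        by_cases hxv : x = v
        · subst hxv; simp [hv']
        · simp [hxv]

-- pvRuns computes (value, total count) over the distinct values in first order
lemma pvRuns_eq (vs : List Int) :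
    pvRuns vs = (PySem.Set.ofList vs).map (fun k => (k, (vs.count k : Int))) := by
  induction hn : vs.length using Nat.strong_induction_on generalizing vs with
  | _ n ih =>
  match vs, hn with
  | [], _ => simp [pvRuns]
  | c :: rest, hn =>
      rw [pvRuns,
        ih (rest.filter (fun v => !(v == c))).length
          (by rw [← hn]; exact Nat.lt_succ_of_le (List.length_filter_le _ _)) _ rfl,
        PySem.Set.ofList_cons, List.map_cons, pvOfList_filter]
      refine congrArg₂ _ rfl ?_
      unfold PySem.Set.discard
      apply List.map_congr_left
      intro k hk
      have hkc : (k == c) = false := by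
        rcases List.mem_filter.mp hk with ⟨_, h2⟩
        simpa using h2
      have hcnt : rest.count k = (c :: rest).count k := by
        have hck : ¬ c = k := fun h => by simp [h] at hkc
        simp [hck]
      rw [List.count_filter (by simpa using hkc), hcnt]

-- keys produced by pvRuns are the distinct values: Nodup
lemma pvRuns_keys_nodup (vs : List Int) : ((pvRuns vs).map Prod.fst).Nodup := by
  rw [pvRuns_eq, List.map_map]
  have h : (Prod.fst ∘ fun k => (k, (vs.count k : Int))) = id := rfl
  rw [h, List.map_id]
  exact PySem.Set.nodup_ofList vs

-- dict(pairs) on a Nodup-key pair list keeps the list as its items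
lemma pvItems_ofList (l : List (Int × Int)) (h : (l.map Prod.fst).Nodup) :
    (PySem.Dict.ofList l).items = l := by
  unfold PySem.Dict.ofList PySem.Dict.update
  have := PySem.Dict.items_foldl_insert_fresh l Prod.fst Prod.snd PySem.Dict.empty
    (fun a _ => by simp [pysem]) h
  simpa using this

-- the loop of A over an arbitrary dict's keys is Counter of its values
lemma pvMain (d : PySem.Dict String Int) (hnd : d.keys.Nodup) :
    (d.keys.foldl (fun frequencies w1 =>
        let ngram_count := d.getD w1 0
        if frequencies.contains ngram_count then frequencies.modify ngram_count 0 (· + 1)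
        else frequencies.insert ngram_count 1)
      (PySem.Dict.empty : PySem.Dict Int Int)).items = pvRuns d.values := by
  have h1 := PySem.List.foldl_congr_mem d.keys
      (fun frequencies w1 =>
        let ngram_count := d.getD w1 0
        if frequencies.contains ngram_count then frequencies.modify ngram_count 0 (· + 1)
        else frequencies.insert ngram_count 1)
      (fun freq w => freq.modify (d.getD w 0) 0 (· + 1))
      (PySem.Dict.empty : PySem.Dict Int Int)
      (fun freq w _ => pvStep_eq freq (d.getD w 0))
  rw [h1,
      show List.foldl (fun freq w => freq.modify (d.getD w 0) 0 (· + 1))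
          (PySem.Dict.empty : PySem.Dict Int Int) d.keys
        = List.foldl (fun freq v => freq.modify v 0 (· + 1))
          (PySem.Dict.empty : PySem.Dict Int Int) (d.keys.map (fun w => d.getD w 0)) from
        (List.foldl_map (f := fun w => d.getD w 0)
          (g := fun freq v => freq.modify v 0 (· + 1))
          (l := d.keys) (init := (PySem.Dict.empty : PySem.Dict Int Int))).symm,
      ← PySem.Dict.values_eq_map_keys d hnd 0,
      ← PySem.Dict.counter_eq_foldl, PySem.Dict.items_counter, pvRuns_eq]

-- ===== VERDICT (by name: the statement is the Claim_ definition above) =====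
theorem getfreferunigram_spec : Claim_equal_getfreferunigram := by
  intro um _
  unfold Spec_getfreferunigram getfreferunigram getfreferunigram_alt
  rw [pvItems_ofList _ (pvRuns_keys_nodup _)]
  exact pvMain (PySem.Dict.ofList um) (PySem.Dict.nodup_keys_ofList um)
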